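-- pv_equiv track=rewrite | github.com/Nithish130603/Vantage | backend/agents/graph.py | _parse_comparison_result
-- ===== SOURCE A (Python) =====
-- def _parse_comparison_result(text: str) -> dict:
--     """Extract key sections from the comparison report into a structured dict."""
--     result: dict = {"full": text}
--     for key, marker in [
--         ("winner", "WINNER"), ("scorecard", "SIGNAL SCORECARD"),
--         ("differentiators", "KEY DIFFERENTIATORS"),
--         ("runner_up_case", "RUNNER-UP CASE"),
--         ("red_flags", "RED FLAGS"), ("verdict", "VERDICT"),
--     ]:
--         idx = text.upper().find(f"**{marker}**")
--         if idx == -1: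
--             idx = text.upper().find(marker)
--         if idx == -1:
--             continue
--         start = idx + len(marker) + 2  # skip ** **
--         # find next section marker
--         end = len(text)
--         for other in ["WINNER", "SIGNAL SCORECARD", "KEY DIFFERENTIATORS",
--                       "RUNNER-UP CASE", "RED FLAGS", "VERDICT"]:
--             if other == marker:
--                 continue
--             for prefix in [f"**{other}**", other]:
--                 oi = text.upper().find(prefix, start)
--                 if oi != -1 and oi < end:
--                     end = oi
--         result[key] = text[start:end].strip()
--     return result
-- ===== SOURCE B (Python) =====
-- MARKERS = ["WINNER", "SIGNAL SCORECARD", "KEY DIFFERENTIATORS",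
--            "RUNNER-UP CASE", "RED FLAGS", "VERDICT"]
-- KEYS = ["winner", "scorecard", "differentiators",
--         "runner_up_case", "red_flags", "verdict"]
--
--
-- def _parse_comparison_result(text: str) -> dict:
--     """Index the text once per marker form, then read sections off the index."""
--     upper = text.upper()
--     n = len(text)
--     # indexing pass: every occurrence position of the bold and plain form of each marker
--     occ = []
--     for m in MARKERS:
--         bold = "**" + m + "**"
--         occ.append((m, ([i for i in range(len(upper) + 1) if upper[i:i + len(bold)] == bold],
--                         [i for i in range(len(upper) + 1) if upper[i:i + len(m)] == m])))
--     result = {"full": text}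
--     for key, (m, (bold_pos, plain_pos)) in zip(KEYS, occ):
--         if bold_pos:
--             start = bold_pos[0] + len(m) + 2
--         elif plain_pos:
--             start = plain_pos[0] + len(m) + 2
--         else:
--             continue
--         cands = [i for o, (b, p) in occ if o != m
--                  for lst in (b, p) for i in lst if i >= start]
--         end = min(cands, default=n)
--         result[key] = text[start:end].strip()
--     return result
-- ===== Notes on version B (the rewrite author's own statement) =====
-- stated objective: alternative
-- what changed: A re-scans the text with find/findFrom for every (marker, other, prefix) pair (6 starts plus 6x5x2 end searches); B builds one occurrence index (all positions of each bold/plain marker form) in a single indexing pass and then reads each section's start (first occurrence) and end (minimum indexed occurrence of any other marker at-or-after start, default len(text)) off that index.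
import Mathlib
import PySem

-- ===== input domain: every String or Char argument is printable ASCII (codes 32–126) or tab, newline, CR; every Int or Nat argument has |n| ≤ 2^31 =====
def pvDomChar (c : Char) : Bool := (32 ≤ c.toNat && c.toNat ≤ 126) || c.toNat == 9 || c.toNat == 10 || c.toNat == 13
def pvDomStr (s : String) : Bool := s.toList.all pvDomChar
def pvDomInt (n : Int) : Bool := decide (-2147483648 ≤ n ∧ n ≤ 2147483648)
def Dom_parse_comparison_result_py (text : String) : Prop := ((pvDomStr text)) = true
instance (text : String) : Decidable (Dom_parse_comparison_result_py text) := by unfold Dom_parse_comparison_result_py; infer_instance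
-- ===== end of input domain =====

-- B replaces A's 72 repeated `.find` scans by one occurrence index per marker form, then
-- reads starts and ends off the index (objective: alternative decomposition, same observable result).

-- shared data: the six markers and the bold form "**MARKER**"
def pvMARKERS : List String :=
  ["WINNER", "SIGNAL SCORECARD", "KEY DIFFERENTIATORS", "RUNNER-UP CASE", "RED FLAGS", "VERDICT"]
def pvBold (m : List Char) : List Char := '*' :: '*' :: (m ++ ['*', '*'])

-- ===== PORT A =====
-- `if oi != -1 and oi < end: end = oi` for one prefix
def pvUpdateA (up : List Char) (start : Int) (endv : Int) (pre : List Char) : Int :=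
  let oi := PySem.Chars.findFrom up pre start
  if oi ≠ -1 ∧ oi < endv then oi else endv

-- the `for other in [...]` / `for prefix in [...]` end-search loops of A
def pvEndA (up : List Char) (m : String) (start : Int) (n : Int) : Int :=
  List.foldl (fun endv other =>
    if other = m then endv
    else List.foldl (pvUpdateA up start) endv [pvBold other.toList, other.toList]) n pvMARKERS

-- one iteration of A's main `for key, marker in [...]` loop
def pvStepA (cs : List Char) (result : List (String × String)) (kv : String × String) :
    List (String × String) :=
  let up := PySem.Chars.upper cs
  let marker := kv.2.toList
  let idx0 := PySem.Chars.find up (pvBold marker)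
  let idx := if idx0 = -1 then PySem.Chars.find up marker else idx0
  if idx = -1 then result
  else
    let start : Int := idx + marker.length + 2
    let endv := pvEndA up kv.2 start (cs.length : Int)
    result ++ [(kv.1, String.ofList (PySem.Chars.strip (PySem.List.slice cs (some start) (some endv))))]

def parse_comparison_result_py (text : String) : List (String × String) :=
  List.foldl (pvStepA text.toList) [("full", text)]
    [("winner", "WINNER"), ("scorecard", "SIGNAL SCORECARD"),
     ("differentiators", "KEY DIFFERENTIATORS"), ("runner_up_case", "RUNNER-UP CASE"),
     ("red_flags", "RED FLAGS"), ("verdict", "VERDICT")]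

-- ===== PORT B =====
def pvKEYS : List String :=
  ["winner", "scorecard", "differentiators", "runner_up_case", "red_flags", "verdict"]

-- `[i for i in range(len(upper) + 1) if upper[i:i+len(pat)] == pat]`
def pvOccAll (up pat : List Char) : List Int :=
  (PySem.List.pyRange 0 ((up.length : Int) + 1)).filter
    (fun i => PySem.List.slice up (some i) (some (i + (pat.length : Int))) == pat)

-- the indexing pass: for each marker its bold-form and plain-form occurrence positions
def pvOccTable (up : List Char) : List (String × (List Int × List Int)) :=
  pvMARKERS.map (fun m => (m, (pvOccAll up (pvBold m.toList), pvOccAll up m.toList)))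

-- `[i for o, (b, p) in occ if o != m for lst in (b, p) for i in lst if i >= start]`
def pvCands (occ : List (String × (List Int × List Int))) (m : String) (start : Int) : List Int :=
  occ.flatMap (fun obp => if obp.1 = m then []
    else obp.2.1.filter (fun i => decide (start ≤ i)) ++ obp.2.2.filter (fun i => decide (start ≤ i)))

def pvEmitB (cs : List Char) (occ : List (String × (List Int × List Int)))
    (result : List (String × String)) (key m : String) (start : Int) : List (String × String) :=
  let endv := PySem.List.minD (pvCands occ m start) (fun i => i) (cs.length : Int)
  result ++ [(key, String.ofList (PySem.Chars.strip (PySem.List.slice cs (some start) (some endv))))]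

-- one iteration of B's `for key, (m, (bold_pos, plain_pos)) in zip(KEYS, occ)` loop
def pvStepB (cs : List Char) (occ : List (String × (List Int × List Int)))
    (result : List (String × String)) (kv : String × (String × (List Int × List Int))) :
    List (String × String) :=
  match kv.2.2.1 with
  | i :: _ => pvEmitB cs occ result kv.1 kv.2.1 (i + (kv.2.1.toList.length : Int) + 2)
  | [] =>
    match kv.2.2.2 with
    | i :: _ => pvEmitB cs occ result kv.1 kv.2.1 (i + (kv.2.1.toList.length : Int) + 2)
    | [] => result

def parse_comparison_result_py_alt (text : String) : List (String × String) :=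
  let cs := text.toList
  let occ := pvOccTable (PySem.Chars.upper cs)
  List.foldl (pvStepB cs occ) [("full", text)] (List.zip pvKEYS occ)

-- ===== PRECONDITION & SPEC =====
def Spec_parse_comparison_result_py (text : String) (out : List (String × String)) : Prop := out = parse_comparison_result_py_alt text
instance (text : String) (out : List (String × String)) : Decidable (Spec_parse_comparison_result_py text out) := by unfold Spec_parse_comparison_result_py; infer_instance

-- ===== CLAIM (what is proved, stated in full; the proofs are below) =====
def Claim_equal_parse_comparison_result_py : Prop := ∀ (text : String), Dom_parse_comparison_result_py text → Spec_parse_comparison_result_py text (parse_comparison_result_py text)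

-- ===== LEMMAS AND PROOFS =====

theorem pv_len_upper (cs : List Char) : (PySem.Chars.upper cs).length = cs.length := by
  simp [PySem.Chars.upper]

theorem pv_mem_occAll {up pat : List Char} (hp : pat ≠ []) (i : Int) :
    i ∈ pvOccAll up pat ↔ 0 ≤ i ∧ pat <+: up.drop i.toNat := by
  unfold pvOccAll
  rw [List.mem_filter, PySem.List.mem_pyRange_one]
  have hp1 : 1 ≤ pat.length := by
    cases pat with | nil => exact absurd rfl hp | cons a b => simp
  constructor
  · rintro ⟨⟨h0, _⟩, hb⟩
    rw [beq_iff_eq, PySem.List.slice_toNat up h0 (by positivity)] at hb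
    have ht : (i + (pat.length : Int)).toNat - i.toNat = pat.length := by omega
    rw [ht] at hb
    exact ⟨h0, List.prefix_iff_eq_take.mpr hb.symm⟩
  · rintro ⟨h0, hpre⟩
    have hlen : pat.length ≤ (up.drop i.toNat).length := hpre.length_le
    rw [List.length_drop] at hlen
    refine ⟨⟨h0, by omega⟩, ?_⟩
    rw [beq_iff_eq, PySem.List.slice_toNat up h0 (by positivity)]
    have ht : (i + (pat.length : Int)).toNat - i.toNat = pat.length := by omega
    rw [ht]
    exact (List.prefix_iff_eq_take.mp hpre).symm

theorem pv_occAll_le {up pat : List Char} (hp : pat ≠ []) {i : Int} (h : i ∈ pvOccAll up pat) :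
    i + (pat.length : Int) ≤ (up.length : Int) := by
  obtain ⟨h0, hpre⟩ := (pv_mem_occAll hp i).mp h
  have hlen : pat.length ≤ (up.drop i.toNat).length := hpre.length_le
  have hp1 : 1 ≤ pat.length := by
    cases pat with | nil => exact absurd rfl hp | cons a b => simp
  rw [List.length_drop] at hlen
  omega

theorem pv_occAll_sorted (up pat : List Char) : (pvOccAll up pat).Pairwise (· < ·) :=
  (PySem.List.pairwise_lt_pyRange_one 0 ((up.length : Int) + 1)).filter _

theorem pv_head_eq_of_mem_of_le {l : List Int} {r : Int} (hl : l.Pairwise (· < ·))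
    (hr : r ∈ l) (hle : ∀ x ∈ l, r ≤ x) : ∃ t, l = r :: t := by
  cases l with
  | nil => exact absurd hr (List.not_mem_nil)
  | cons h t =>
    have h1 : r ≤ h := hle h List.mem_cons_self
    rcases List.mem_cons.mp hr with rfl | hrt
    · exact ⟨t, rfl⟩
    · have := (List.pairwise_cons.mp hl).1 r hrt
      omega

theorem pv_findFrom_big {up pat : List Char} {start : Int} (h : (up.length : Int) < start) :
    PySem.Chars.findFrom up pat start = -1 := by
  simp only [PySem.Chars.findFrom]
  split_ifs <;> first | rfl | omega

theorem pv_findFrom_nil {up pat : List Char} (hp : pat ≠ []) {start : Int} (hs : 0 ≤ start)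
    (hF : (pvOccAll up pat).filter (fun i => decide (start ≤ i)) = []) :
    PySem.Chars.findFrom up pat start = -1 := by
  by_cases hbig : (up.length : Int) < start
  · exact pv_findFrom_big hbig
  · have hk : start = ((start.toNat : Nat) : Int) := (Int.toNat_of_nonneg hs).symm
    have hkle : start.toNat ≤ up.length := by omega
    rw [hk]
    apply (PySem.Chars.findFrom_natCast_eq_neg_one_iff up pat start.toNat hkle).mpr
    intro hinf
    rw [← PySem.Chars.isIn_iff_infix] at hinf
    obtain ⟨j, hj⟩ := (PySem.Chars.exists_prefix_drop_iff_isIn pat (up.drop start.toNat)).mpr hinf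
    rw [List.drop_drop] at hj
    have hmem : ((start.toNat + j : Nat) : Int) ∈ pvOccAll up pat :=
      (pv_mem_occAll hp _).mpr ⟨by positivity, by rw [Int.toNat_natCast]; exact hj⟩
    have hmem2 : ((start.toNat + j : Nat) : Int) ∈
        (pvOccAll up pat).filter (fun i => decide (start ≤ i)) :=
      List.mem_filter.mpr ⟨hmem, by simp; omega⟩
    rw [hF] at hmem2
    exact absurd hmem2 (List.not_mem_nil)

theorem pv_findFrom_cons {up pat : List Char} (hp : pat ≠ []) {start : Int} (hs : 0 ≤ start)
    {i : Int} {t : List Int}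
    (hF : (pvOccAll up pat).filter (fun i => decide (start ≤ i)) = i :: t) :
    PySem.Chars.findFrom up pat start = i := by
  have hi : i ∈ (pvOccAll up pat).filter (fun i => decide (start ≤ i)) := by
    rw [hF]; exact List.mem_cons_self
  obtain ⟨hiocc, hige⟩ := List.mem_filter.mp hi
  have hige : start ≤ i := by simpa using hige
  obtain ⟨hi0, hipre⟩ := (pv_mem_occAll hp i).mp hiocc
  have hile := pv_occAll_le hp hiocc
  have hp1 : 1 ≤ pat.length := by
    cases pat with | nil => exact absurd rfl hp | cons a b => simp
  have hbig : ¬ (up.length : Int) < start := by omega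
  have hk : start = ((start.toNat : Nat) : Int) := (Int.toNat_of_nonneg hs).symm
  have hkle : start.toNat ≤ up.length := by omega
  have hne : PySem.Chars.findFrom up pat start ≠ -1 := by
    rw [hk]
    intro hcon
    have hninf := (PySem.Chars.findFrom_natCast_eq_neg_one_iff up pat start.toNat hkle).mp hcon
    apply hninf
    rw [← PySem.Chars.isIn_iff_infix]
    apply (PySem.Chars.exists_prefix_drop_iff_isIn pat (up.drop start.toNat)).mp
    refine ⟨i.toNat - start.toNat, ?_⟩
    rw [List.drop_drop]
    have : start.toNat + (i.toNat - start.toNat) = i.toNat := by omega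
    rw [this]
    exact hipre
  rw [hk] at hne ⊢
  obtain ⟨hkr, hrpre, hrmin⟩ := PySem.Chars.findFrom_natCast_spec up pat start.toNat hkle hne
  set r := PySem.Chars.findFrom up pat ((start.toNat : Nat) : Int) with hr
  have hr0 : (0 : Int) ≤ r := le_trans (by omega) hkr
  have hrT : r.toNat = r := Int.toNat_of_nonneg hr0
  have hrmem : r ∈ (pvOccAll up pat).filter (fun i => decide (start ≤ i)) := by
    refine List.mem_filter.mpr ⟨(pv_mem_occAll hp r).mpr ⟨hr0, hrpre⟩, by simp; omega⟩
  have hle : ∀ x ∈ (pvOccAll up pat).filter (fun i => decide (start ≤ i)), r ≤ x := by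
    intro x hx
    obtain ⟨hxocc, hxge⟩ := List.mem_filter.mp hx
    have hxge : start ≤ x := by simpa using hxge
    obtain ⟨hx0, hxpre⟩ := (pv_mem_occAll hp x).mp hxocc
    by_contra hlt
    exact hrmin x.toNat (by omega) (by omega) hxpre
  obtain ⟨t', ht'⟩ := pv_head_eq_of_mem_of_le
    ((pv_occAll_sorted up pat).filter _) hrmem hle
  rw [hF] at ht'
  exact (List.cons.injEq _ _ _ _ ▸ ht').1.symm

theorem pv_filter_zero {up pat : List Char} (hp : pat ≠ []) :
    (pvOccAll up pat).filter (fun i => decide ((0:Int) ≤ i)) = pvOccAll up pat :=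
  List.filter_eq_self.mpr (fun i hi => by simp [((pv_mem_occAll hp i).mp hi).1])

theorem pv_find_nil {up pat : List Char} (hp : pat ≠ []) (hF : pvOccAll up pat = []) :
    PySem.Chars.find up pat = -1 := by
  rw [← PySem.Chars.findFrom_zero up pat]
  exact pv_findFrom_nil hp le_rfl (by rw [pv_filter_zero hp, hF])

theorem pv_find_cons {up pat : List Char} (hp : pat ≠ []) {i : Int} {t : List Int}
    (hF : pvOccAll up pat = i :: t) : PySem.Chars.find up pat = i := by
  rw [← PySem.Chars.findFrom_zero up pat]
  exact pv_findFrom_cons hp le_rfl (by rw [pv_filter_zero hp, hF])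

theorem pv_foldl_min_of_le {a : Int} {l : List Int} (h : ∀ x ∈ l, a ≤ x) :
    List.foldl min a l = a := by
  induction l with
  | nil => rfl
  | cons x t ih =>
    simp only [List.foldl_cons]
    rw [min_eq_left (h x List.mem_cons_self)]
    exact ih (fun y hy => h y (List.mem_cons_of_mem _ hy))

theorem pv_foldl_min_flatMap {α : Type} (f : α → List Int) (l : List α) (e : Int) :
    List.foldl min e (l.flatMap f) = List.foldl (fun e x => List.foldl min e (f x)) e l := by
  induction l generalizing e with
  | nil => rfl
  | cons x t ih => rw [List.flatMap_cons, List.foldl_append, List.foldl_cons, ih]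

theorem pv_min?_cons (t : List Int) (a : Int) :
    PySem.List.min? (a :: t) (fun i => i) = some (List.foldl min a t) := by
  induction t generalizing a with
  | nil => rfl
  | cons x t ih =>
    have h1 : PySem.List.min? (a :: x :: t) (fun i => i)
        = PySem.List.min? (min a x :: t) (fun i => i) := by
      unfold PySem.List.min?
      simp only [List.foldl_cons]
      congr 1
      show (if x < a then some x else some a) = some (min a x)
      rw [min_def]; split_ifs <;> first | rfl | omega
    rw [h1, ih (min a x), List.foldl_cons]

theorem pv_minD_eq (L : List Int) (n : Int) (h : ∀ x ∈ L, x ≤ n) :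
    PySem.List.minD L (fun i => i) n = List.foldl min n L := by
  cases L with
  | nil => rfl
  | cons x t =>
    unfold PySem.List.minD
    rw [pv_min?_cons]
    simp only [Option.getD_some, List.foldl_cons]
    rw [min_eq_right (h x List.mem_cons_self)]

theorem pv_update_eq {up pat : List Char} (hp : pat ≠ []) {start : Int} (hs : 0 ≤ start)
    (endv : Int) :
    pvUpdateA up start endv pat =
      List.foldl min endv ((pvOccAll up pat).filter (fun i => decide (start ≤ i))) := by
  unfold pvUpdateA
  rcases hF : (pvOccAll up pat).filter (fun i => decide (start ≤ i)) with _ | ⟨i, t⟩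
  · rw [pv_findFrom_nil hp hs hF]
    simp
  · rw [pv_findFrom_cons hp hs hF]
    have hi : i ∈ (pvOccAll up pat).filter (fun i => decide (start ≤ i)) := by
      rw [hF]; exact List.mem_cons_self
    have hige : start ≤ i := by simpa using (List.mem_filter.mp hi).2
    have hlt : ∀ x ∈ t, i < x := by
      have := ((pv_occAll_sorted up pat).filter (fun i => decide (start ≤ i)))
      rw [hF] at this
      exact (List.pairwise_cons.mp this).1
    rw [List.foldl_cons,
      pv_foldl_min_of_le (fun x hx => le_trans (min_le_right endv i) (le_of_lt (hlt x hx)))]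
    show (if i ≠ -1 ∧ i < endv then i else endv) = min endv i
    rw [min_def]
    split_ifs <;> first | rfl | omega

theorem pv_markers_ne : ∀ o ∈ pvMARKERS, o.toList ≠ [] := by decide

theorem pv_end_eq (cs : List Char) (m : String) {start : Int} (hs : 0 ≤ start) :
    pvEndA (PySem.Chars.upper cs) m start (cs.length : Int) =
      PySem.List.minD (pvCands (pvOccTable (PySem.Chars.upper cs)) m start) (fun i => i)
        (cs.length : Int) := by
  unfold pvEndA pvCands pvOccTable
  set up := PySem.Chars.upper cs with hup
  rw [pv_minD_eq]
  · rw [List.flatMap_map, pv_foldl_min_flatMap]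
    refine PySem.List.foldl_congr_mem _ _ _ _ ?_
    intro acc o ho
    by_cases hom : o = m
    · simp [hom]
    · simp only [if_neg hom, List.foldl_cons, List.foldl_nil, List.foldl_append]
      rw [pv_update_eq (pv_markers_ne o ho) hs,
        pv_update_eq (show pvBold o.toList ≠ [] by simp [pvBold]) hs]
  · intro x hx
    obtain ⟨obp, hobp, hxin⟩ := List.mem_flatMap.mp hx
    obtain ⟨o, ho, rfl⟩ := List.mem_map.mp hobp
    by_cases hom : o = m
    · rw [if_pos hom] at hxin
      exact absurd hxin (List.not_mem_nil)
    · rw [if_neg hom] at hxin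
      have hxocc : (∃ pat, pat ≠ [] ∧ x ∈ pvOccAll up pat) := by
        rcases List.mem_append.mp hxin with h | h
        · exact ⟨pvBold o.toList, by simp [pvBold], (List.mem_filter.mp h).1⟩
        · exact ⟨o.toList, pv_markers_ne o ho, (List.mem_filter.mp h).1⟩
      obtain ⟨pat, hpne, hxo⟩ := hxocc
      have := pv_occAll_le hpne hxo
      have hp1 : 1 ≤ pat.length := by
        cases pat with | nil => exact absurd rfl hpne | cons a b => simp
      have hlen : up.length = cs.length := by rw [hup]; exact pv_len_upper cs
      omega

theorem pv_step_eq (cs : List Char) (key m : String) (hm : m.toList ≠ [])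
    (acc : List (String × String)) :
    pvStepA cs acc (key, m) =
      pvStepB cs (pvOccTable (PySem.Chars.upper cs)) acc
        (key, (m, (pvOccAll (PySem.Chars.upper cs) (pvBold m.toList),
                   pvOccAll (PySem.Chars.upper cs) m.toList))) := by
  simp only [pvStepA, pvStepB]
  set up := PySem.Chars.upper cs with hup
  rcases hB : pvOccAll up (pvBold m.toList) with _ | ⟨i, t⟩
  · rw [pv_find_nil (show pvBold m.toList ≠ [] by simp [pvBold]) hB]
    rcases hP : pvOccAll up m.toList with _ | ⟨j, t'⟩
    · rw [pv_find_nil hm hP]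
      rfl
    · have hj0 : 0 ≤ j := ((pv_mem_occAll hm j).mp (by rw [hP]; exact List.mem_cons_self)).1
      rw [pv_find_cons hm hP, if_pos (rfl : (-1 : Int) = -1),
        if_neg (by omega : ¬ j = -1)]
      show acc ++ _ = pvEmitB cs (pvOccTable up) acc key m (j + (m.toList.length : Int) + 2)
      unfold pvEmitB
      rw [pv_end_eq cs m (by omega : (0 : Int) ≤ j + (m.toList.length : Int) + 2)]
  · have hi0 : 0 ≤ i :=
      ((pv_mem_occAll (show pvBold m.toList ≠ [] by simp [pvBold]) i).mp
        (by rw [hB]; exact List.mem_cons_self)).1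
    rw [pv_find_cons (show pvBold m.toList ≠ [] by simp [pvBold]) hB,
      if_neg (by omega : ¬ i = -1), if_neg (by omega : ¬ i = -1)]
    show acc ++ _ = pvEmitB cs (pvOccTable up) acc key m (i + (m.toList.length : Int) + 2)
    unfold pvEmitB
    rw [pv_end_eq cs m (by omega : (0 : Int) ≤ i + (m.toList.length : Int) + 2)]

-- ===== VERDICT (by name: the statement is the Claim_ definition above) =====
theorem parse_comparison_result_py_spec : Claim_equal_parse_comparison_result_py := by
  intro text _
  unfold Spec_parse_comparison_result_py parse_comparison_result_py parse_comparison_result_py_alt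
  have hz : List.zip pvKEYS (pvOccTable (PySem.Chars.upper text.toList)) =
      ([("winner", "WINNER"), ("scorecard", "SIGNAL SCORECARD"),
        ("differentiators", "KEY DIFFERENTIATORS"), ("runner_up_case", "RUNNER-UP CASE"),
        ("red_flags", "RED FLAGS"), ("verdict", "VERDICT")].map
        (fun kv => (kv.1, (kv.2, (pvOccAll (PySem.Chars.upper text.toList) (pvBold kv.2.toList),
                                  pvOccAll (PySem.Chars.upper text.toList) kv.2.toList))))) := rfl
  show _ = List.foldl (pvStepB text.toList (pvOccTable (PySem.Chars.upper text.toList)))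
      [("full", text)] (List.zip pvKEYS (pvOccTable (PySem.Chars.upper text.toList)))
  rw [hz, List.foldl_map]
  refine PySem.List.foldl_congr_mem _ _ _ _ ?_
  intro acc kv hkv
  fin_cases hkv <;>
    exact pv_step_eq text.toList _ _ (by decide) acc
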